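-- pv_equiv track=rewrite | github.com/virage810421/test-2026-3-22OK | fts_twap3_child_order_engine.py | _split_qty
-- ===== SOURCE A (Python) =====
-- def _split_qty(total_qty: int, child_count: int = 3) -> list[int]:
--     total_qty = max(0, int(total_qty))
--     child_count = max(1, int(child_count))
--     if total_qty <= 0:
--         return []
--     base = total_qty // child_count
--     rem = total_qty % child_count
--     chunks = [base + (1 if i < rem else 0) for i in range(child_count)]
--     return [q for q in chunks if q > 0]
-- ===== SOURCE B (Python) =====
-- def _split_qty(total_qty: int, child_count: int = 3) -> list[int]:
--     total_qty = max(0, int(total_qty))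
--     child_count = max(1, int(child_count))
--     if total_qty <= 0:
--         return []
--     chunks = []
--     remaining = total_qty
--     for left in range(child_count, 0, -1):
--         chunk = (remaining + left - 1) // left
--         chunks.append(chunk)
--         remaining -= chunk
--     return [q for q in chunks if q > 0]
-- ===== Notes on version B (the rewrite author's own statement) =====
-- stated objective: alternative
-- what changed: Replaces the base//count + remainder-indexed comprehension with a greedy running-remainder loop that takes ceil(remaining/children_left) per child, counting children down.
import Mathlib
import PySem

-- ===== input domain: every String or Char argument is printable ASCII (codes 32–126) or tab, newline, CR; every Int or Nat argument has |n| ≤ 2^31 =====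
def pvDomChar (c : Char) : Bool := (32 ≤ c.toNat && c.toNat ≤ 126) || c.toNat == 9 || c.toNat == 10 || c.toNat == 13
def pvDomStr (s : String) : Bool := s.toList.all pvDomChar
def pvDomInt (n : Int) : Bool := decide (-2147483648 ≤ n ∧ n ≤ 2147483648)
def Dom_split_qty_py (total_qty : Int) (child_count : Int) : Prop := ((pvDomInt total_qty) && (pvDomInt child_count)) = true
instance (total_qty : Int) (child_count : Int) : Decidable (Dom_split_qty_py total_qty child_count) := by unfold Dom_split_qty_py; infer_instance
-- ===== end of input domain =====

-- B replaces A's base//count + remainder-indexed comprehension by a greedy loop that repeatedly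
-- takes ceil(remaining/children_left); same cost, different decomposition (objective: alternative).

-- ===== PORT A =====
def split_qty_py (total_qty : Int) (child_count : Int) : List Int :=
  let total := max 0 total_qty
  let cc := max 1 child_count
  if total ≤ 0 then []
  else
    let base := PySem.Int.floordiv total cc
    let rem := PySem.Int.mod total cc
    let chunks := (PySem.List.pyRange 0 cc 1).map (fun i => base + (if i < rem then (1 : Int) else 0))
    chunks.filter (fun q => decide (0 < q))

-- ===== PORT B =====
-- the 'for left in range(child_count, 0, -1)' loop, counting down; 'left' is k+1 at each step
def pvGreedy : Nat → Int → List Int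
  | 0, _ => []
  | Nat.succ k, remaining =>
      let left : Int := ((k + 1 : Nat) : Int)
      let chunk := PySem.Int.floordiv (remaining + left - 1) left
      chunk :: pvGreedy k (remaining - chunk)

def split_qty_py_alt (total_qty : Int) (child_count : Int) : List Int :=
  let total := max 0 total_qty
  let cc := max 1 child_count
  if total ≤ 0 then []
  else (pvGreedy cc.toNat total).filter (fun q => decide (0 < q))

-- ===== PRECONDITION & SPEC =====
def Spec_split_qty_py (total_qty : Int) (child_count : Int) (out : List Int) : Prop := out = split_qty_py_alt total_qty child_count
instance (total_qty : Int) (child_count : Int) (out : List Int) : Decidable (Spec_split_qty_py total_qty child_count out) := by unfold Spec_split_qty_py; infer_instance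

-- ===== CLAIM (what is proved, stated in full; the proofs are below) =====
def Claim_equal_split_qty_py : Prop := ∀ (total_qty : Int) (child_count : Int), Dom_split_qty_py total_qty child_count → Spec_split_qty_py total_qty child_count (split_qty_py total_qty child_count)

-- ===== LEMMAS AND PROOFS =====

lemma pvGreedy_succ (k : Nat) (R : Int) :
    pvGreedy (k + 1) R =
      PySem.Int.floordiv (R + ((k + 1 : Nat) : Int) - 1) ((k + 1 : Nat) : Int) ::
        pvGreedy k (R - PySem.Int.floordiv (R + ((k + 1 : Nat) : Int) - 1) ((k + 1 : Nat) : Int)) := rfl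

-- the greedy loop on base*k + r (0 ≤ r ≤ k) yields r copies of base+1 then k-r copies of base
lemma pvGreedy_eq (k : Nat) : ∀ (base r : Int), 0 ≤ base → 0 ≤ r → r ≤ (k : Int) →
    pvGreedy k (base * (k : Int) + r) =
      List.replicate r.toNat (base + 1) ++ List.replicate (k - r.toNat) base := by
  induction k with
  | zero =>
      intro base r _ hr0 hr
      have : r = 0 := le_antisymm (by exact_mod_cast hr) hr0
      subst this
      simp [pvGreedy]
  | succ k ih =>
      intro base r hb hr0 hr
      have hpos : (0 : Int) < ((k + 1 : Nat) : Int) := by positivity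
      rw [pvGreedy_succ]
      by_cases hz : r = 0
      · subst hz
        have hch : PySem.Int.floordiv (base * ((k + 1 : Nat) : Int) + 0 + ((k + 1 : Nat) : Int) - 1) ((k + 1 : Nat) : Int) = base := by
          rw [PySem.Int.floordiv_eq_iff_of_pos hpos]
          push_cast
          constructor <;> nlinarith
        rw [hch]
        have hrec : base * ((k + 1 : Nat) : Int) + 0 - base = base * (k : Int) + 0 := by
          push_cast; ring
        rw [hrec, ih base 0 hb le_rfl (by positivity)]
        simp [List.replicate_succ]
      · have hr1 : 1 ≤ r := by omega
        have hrk : r - 1 ≤ (k : Int) := by push_cast at hr; omega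
        have hch : PySem.Int.floordiv (base * ((k + 1 : Nat) : Int) + r + ((k + 1 : Nat) : Int) - 1) ((k + 1 : Nat) : Int) = base + 1 := by
          rw [PySem.Int.floordiv_eq_iff_of_pos hpos]
          push_cast
          push_cast at hr
          constructor <;> nlinarith
        rw [hch]
        have hrec : base * ((k + 1 : Nat) : Int) + r - (base + 1) = base * (k : Int) + (r - 1) := by
          push_cast; ring
        rw [hrec, ih base (r - 1) hb (by omega) hrk]
        have h1 : r.toNat = (r - 1).toNat + 1 := by omega
        rw [h1, List.replicate_succ]
        have h2 : k + 1 - ((r - 1).toNat + 1) = k - (r - 1).toNat := by omega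
        rw [h2]
        simp

-- A's comprehension over range(cc) is the same replicate-append shape
lemma pvMapRange_eq (n : Nat) (base r : Int) (hr0 : 0 ≤ r) (hrn : r ≤ (n : Int)) :
    (List.range n).map (fun k => base + (if ((k : Nat) : Int) < r then (1 : Int) else 0)) =
      List.replicate r.toNat (base + 1) ++ List.replicate (n - r.toNat) base := by
  apply List.ext_getElem
  · simp; omega
  · intro i h1 h2
    simp only [List.getElem_map, List.getElem_range]
    rcases lt_or_ge i r.toNat with hi | hi
    · rw [List.getElem_append_left (by simpa using hi)]
      have : ((i : Nat) : Int) < r := by omega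
      simp [this]
    · rw [List.getElem_append_right (by simpa using hi)]
      have : ¬ ((i : Nat) : Int) < r := by omega
      simp [this]

lemma pv_main (total_qty child_count : Int) :
    split_qty_py total_qty child_count = split_qty_py_alt total_qty child_count := by
  unfold split_qty_py split_qty_py_alt
  set t := max 0 total_qty with ht
  set c := max 1 child_count with hc
  by_cases h : t ≤ 0
  · simp [h]
  · simp only [h, if_false]
    have hcpos : (0 : Int) < c := by omega
    have hcnat : ((c.toNat : Nat) : Int) = c := Int.toNat_of_nonneg (by omega)
    set base := PySem.Int.floordiv t c with hbase
    set r := PySem.Int.mod t c with hrdef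
    have hr0 : 0 ≤ r := PySem.Int.mod_nonneg t hcpos
    have hrc : r < c := PySem.Int.mod_lt t hcpos
    have hb0 : 0 ≤ base := by
      rw [hbase, PySem.Int.le_floordiv_iff_mul_le hcpos]
      omega
    have hsum : base * c + r = t := PySem.Int.floordiv_mul_add_mod t c
    congr 1
    rw [PySem.List.pyRange_zero, List.map_map]
    have hA := pvMapRange_eq c.toNat base r hr0 (by rw [hcnat]; omega)
    have hB := pvGreedy_eq c.toNat base r hb0 hr0 (by rw [hcnat]; omega)
    have htB : base * ((c.toNat : Nat) : Int) + r = t := by rw [hcnat]; exact hsum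
    rw [htB] at hB
    rw [hB, ← hA]
    rfl

-- ===== VERDICT (by name: the statement is the Claim_ definition above) =====
theorem split_qty_py_spec : Claim_equal_split_qty_py := by
  intro total_qty child_count _
  exact pv_main total_qty child_count
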